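-- pv_equiv track=rewrite | github.com/KW17-STUDY/2022-Summer-Study | GU/Kakao/2019_KAKAO_BLIND_RECRUITMENT/무지의_먹방_라이브.py | solution
-- ===== SOURCE A (Python) =====
-- from collections import defaultdict
--
-- def solution(food_times, k):
--     answer = 0
--     foods = defaultdict(int)
--     order= []
--     for idx, food in enumerate(food_times):
--         foods[idx] = food
--     while True:
--         for i in foods:
--             if foods[i] >0:
--                 order.append(i)
--                 foods[i]-=1
--         if sum(foods.values()) == 0:
--             break
--     if k>len(order)-1:
--         answer = -1
--     else:
--         answer = order[k]+1
--     return answer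
-- ===== SOURCE B (Python) =====
-- def solution(food_times, k):
--     # Total seconds of eating available (rounds only visit foods with time > 0).
--     total = sum(t for t in food_times if t > 0)
--     if k >= total:
--         return -1
--
--     def eaten(r):
--         # Number of seconds consumed by the first r full rounds.
--         return sum(min(t, r) for t in food_times if t > 0)
--
--     # Binary search for the round r during which second k happens:
--     # eaten(r) <= k < eaten(r + 1).
--     lo, hi = 0, max(food_times)
--     while lo < hi:
--         mid = (lo + hi) // 2
--         if eaten(mid + 1) <= k:
--             lo = mid + 1
--         else:
--             hi = mid
--     rem = k - eaten(lo)
--     survivors = [i for i, t in enumerate(food_times) if t > lo]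
--     return survivors[rem] + 1
-- ===== Notes on version B (the rewrite author's own statement) =====
-- stated objective: faster
-- what changed: A simulates the eating second by second (one dict pass per round, materialising the whole eating order); B computes the answer directly by binary-searching the round r with eaten(r) <= k < eaten(r+1) over the closed-form round-prefix count eaten(r) = sum(min(t, r)) and indexing into that round's survivors.
-- outside the precondition, e.g. on solution([2, 1], -1): A returns 1, B returns 2; on solution([2, -1], 1): A returns -1, B returns 1
import Mathlib
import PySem

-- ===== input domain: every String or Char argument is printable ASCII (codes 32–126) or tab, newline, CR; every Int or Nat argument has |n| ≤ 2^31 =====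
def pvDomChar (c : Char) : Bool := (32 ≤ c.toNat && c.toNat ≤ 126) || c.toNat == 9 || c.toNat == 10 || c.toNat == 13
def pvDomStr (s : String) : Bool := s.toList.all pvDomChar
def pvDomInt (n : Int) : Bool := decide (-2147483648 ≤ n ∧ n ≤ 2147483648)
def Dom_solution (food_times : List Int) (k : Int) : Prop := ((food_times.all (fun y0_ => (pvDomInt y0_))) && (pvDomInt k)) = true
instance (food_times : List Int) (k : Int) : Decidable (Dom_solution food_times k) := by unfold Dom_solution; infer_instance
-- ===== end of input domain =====

-- B replaces A's second-by-second round-robin simulation by a binary search for the round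
-- containing second k over the closed-form per-round prefix count; equivalence is proved on
-- Pre_solution (non-negative food times, non-negative k).

-- ===== PORT A =====
-- One pass of A's inner `for i in foods` loop over the remaining values, indices from i:
-- returns (indices appended to order this pass, updated values).
def passA : List Int → Int → (List Int × List Int)
  | [], _ => ([], [])
  | v :: vs, i =>
    let (ord, vs') := passA vs (i + 1)
    if v > 0 then (i :: ord, (v - 1) :: vs') else (ord, v :: vs')

-- A's `while True` loop; fuel bounds the number of passes (on Pre_solution the loop breaks
-- after at most max(food_times) ≤ sum-of-positives + 1 passes, so this fuel is never exhausted).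
def loopA (fuel : Nat) (order : List Int) (vals : List Int) : List Int :=
  match fuel with
  | 0 => order
  | fuel + 1 =>
    let (app, vals') := passA vals 0
    let order' := order ++ app
    if vals'.sum = 0 then order' else loopA fuel order' vals'

def solution (food_times : List Int) (k : Int) : Int :=
  let order := loopA ((food_times.filter (fun t => 0 < t)).sum + 1).toNat [] food_times
  if k > (order.length : Int) - 1 then -1
  else (PySem.List.pyGet? order k).getD 0 + 1

-- ===== PORT B =====
-- eaten(r) = sum(min(t, r) for t in food_times if t > 0)
def eatenB (food_times : List Int) (r : Int) : Int :=
  ((food_times.filter (fun t => 0 < t)).map (fun t => min t r)).sum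

-- the `while lo < hi` binary-search loop of B; fuel bounds the iteration count
-- (hi - lo shrinks every iteration, so the fuel below is never exhausted)
def bsearchGo (food_times : List Int) (k : Int) : Nat → Int → Int → Int
  | 0, lo, _ => lo
  | fuel + 1, lo, hi =>
    if lo < hi then
      let mid := PySem.Int.floordiv (lo + hi) 2
      if eatenB food_times (mid + 1) ≤ k then bsearchGo food_times k fuel (mid + 1) hi
      else bsearchGo food_times k fuel lo mid
    else lo

def bsearchB (food_times : List Int) (k lo hi : Int) : Int :=
  bsearchGo food_times k ((hi - lo).toNat + 1) lo hi

def solution_alt (food_times : List Int) (k : Int) : Int :=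
  let total := (food_times.filter (fun t => 0 < t)).sum
  if k ≥ total then -1
  else
    let r := bsearchB food_times k 0 ((PySem.List.max? food_times (fun t => t)).getD 0)
    let rem := k - eatenB food_times r
    let survivors := ((PySem.List.enumerate food_times 0).filter (fun p => decide (r < p.2))).map (fun p => p.1)
    (PySem.List.pyGet? survivors rem).getD 0 + 1

-- ===== PRECONDITION & SPEC =====
-- Pre_ excludes negative food times (A's `sum(values) == 0` break can then fire mid-simulation
-- or never, so A returns an accidental value or diverges) and negative k (A's answer then comes
-- from Python's negative-index wraparound or is an IndexError).
def Pre_solution (food_times : List Int) (k : Int) : Prop :=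
  (∀ t ∈ food_times, 0 ≤ t) ∧ 0 ≤ k
instance (food_times : List Int) (k : Int) : Decidable (Pre_solution food_times k) := by
  unfold Pre_solution; infer_instance

def pvWitness_solution : List Int × Int := ([3, 1, 2], 5)

def Spec_solution (food_times : List Int) (k : Int) (out : Int) : Prop := out = solution_alt food_times k
instance (food_times : List Int) (k : Int) (out : Int) : Decidable (Spec_solution food_times k out) := by unfold Spec_solution; infer_instance

-- ===== CLAIM (what is proved, stated in full; the proofs are below) =====
def Claim_equal_solution : Prop := ∀ (food_times : List Int) (k : Int), Dom_solution food_times k → Pre_solution food_times k → Spec_solution food_times k (solution food_times k)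

-- ===== LEMMAS AND PROOFS =====

-- indices i, i+1, … of the entries with value > r (round r's eating order, general start index)
def survIdx (ts : List Int) (r : Int) (i : Int) : List Int :=
  match ts with
  | [] => []
  | t :: ts => if r < t then i :: survIdx ts r (i + 1) else survIdx ts r (i + 1)

-- concatenation of rounds p, p+1, …, p+f-1
def rounds (ts : List Int) (p : Int) : Nat → List Int
  | 0 => []
  | f + 1 => survIdx ts p 0 ++ rounds ts (p + 1) f

theorem survIdx_b (ts : List Int) (r i : Int) :
    ((PySem.List.enumerate ts i).filter (fun p => decide (r < p.2))).map (fun p => p.1)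
      = survIdx ts r i := by
  induction ts generalizing i with
  | nil => simp [PySem.List.enumerate_nil, survIdx]
  | cons t ts ih =>
    rw [PySem.List.enumerate_cons]
    by_cases h : r < t <;> simp [survIdx, h, ih]

theorem passA_model (ts : List Int) (p i : Int) (_hp : 0 ≤ p) (h : ∀ t ∈ ts, 0 ≤ t) :
    passA (ts.map (fun t => t - min t p)) i
      = (survIdx ts p i, ts.map (fun t => t - min t (p + 1))) := by
  induction ts generalizing i with
  | nil => simp [passA, survIdx]
  | cons t ts ih =>
    have ht : 0 ≤ t := h t (by simp)
    have hts : ∀ t ∈ ts, 0 ≤ t := fun t ht => h t (by simp [ht])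
    simp only [List.map_cons, passA, ih (i + 1) hts, survIdx]
    by_cases hc : p < t
    · have h1 : t - min t p > 0 := by omega
      have h2 : t - min t p - 1 = t - min t (p + 1) := by omega
      simp only [if_pos h1, h2]
      rw [if_pos hc]
    · have h1 : ¬ (t - min t p > 0) := by omega
      rw [if_neg h1, if_neg hc]
      have h2 : t - min t p = t - min t (p + 1) := by omega
      rw [h2]

theorem valsSum_zero_iff (ts : List Int) (p : Int) (_hp : 0 ≤ p) (h : ∀ t ∈ ts, 0 ≤ t) :
    (ts.map (fun t => t - min t p)).sum = 0 ↔ ∀ t ∈ ts, t ≤ p := by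
  induction ts with
  | nil => simp
  | cons t ts ih =>
    have ht : 0 ≤ t := h t (by simp)
    have hts : ∀ t ∈ ts, 0 ≤ t := fun t ht => h t (by simp [ht])
    have hrest : 0 ≤ (ts.map (fun t => t - min t p)).sum :=
      List.sum_nonneg (by
        intro x hx
        obtain ⟨y, hy, rfl⟩ := List.mem_map.1 hx
        have := hts y hy
        omega)
    simp only [List.map_cons, List.sum_cons, List.forall_mem_cons]
    constructor
    · intro h0
      have h1 : (ts.map (fun t => t - min t p)).sum = 0 := by omega
      exact ⟨by omega, (ih hts).1 h1⟩
    · rintro ⟨h1, h2⟩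
      have h3 := (ih hts).2 h2
      omega

theorem survIdx_nil_of_le (ts : List Int) (p : Int) :
    ∀ i, (∀ t ∈ ts, t ≤ p) → survIdx ts p i = [] := by
  induction ts with
  | nil => intro i h; rfl
  | cons t ts ih =>
    intro i h
    have h0 := h t (by simp)
    simp only [survIdx, if_neg (show ¬ p < t by omega)]
    exact ih _ (fun t ht => h t (by simp [ht]))

theorem rounds_nil_of_le (ts : List Int) (p : Int) (f : Nat) (h : ∀ t ∈ ts, t ≤ p) :
    rounds ts p f = [] := by
  induction f generalizing p with
  | zero => rfl
  | succ f ih =>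
    simp only [rounds, survIdx_nil_of_le ts p 0 h, List.nil_append]
    exact ih (p + 1) (fun t ht => by have := h t ht; omega)

theorem loopA_model (ts : List Int) (h : ∀ t ∈ ts, 0 ≤ t) :
    ∀ (fuel : Nat) (p : Int) (acc : List Int), 0 ≤ p → (∀ t ∈ ts, t ≤ p + fuel) →
    loopA fuel acc (ts.map (fun t => t - min t p)) = acc ++ rounds ts p fuel := by
  intro fuel
  induction fuel with
  | zero => intro p acc hp hb; simp [loopA, rounds]
  | succ fuel ih =>
    intro p acc hp hb
    rw [loopA, passA_model ts p 0 hp h]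
    simp only
    by_cases hz : (ts.map (fun t => t - min t (p + 1))).sum = 0
    · have hall : ∀ t ∈ ts, t ≤ p + 1 := (valsSum_zero_iff ts (p + 1) (by omega) h).1 hz
      rw [if_pos hz, rounds, rounds_nil_of_le ts (p + 1) fuel hall, List.append_nil]
    · rw [if_neg hz, ih (p + 1) (acc ++ survIdx ts p 0) (by omega)
        (fun t ht => by have := hb t ht; push_cast at this ⊢; omega)]
      rw [rounds, List.append_assoc]

theorem eatenB_cons (t : Int) (ts : List Int) (x : Int) :
    eatenB (t :: ts) x = (if 0 < t then min t x else 0) + eatenB ts x := by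
  simp only [eatenB, List.filter_cons]
  by_cases h : 0 < t
  · simp [h]
  · simp [h]

theorem eatenB_zero (ts : List Int) : eatenB ts 0 = 0 := by
  induction ts with
  | nil => rfl
  | cons t ts ih =>
    rw [eatenB_cons, ih]
    by_cases h : 0 < t
    · simp [h]
      omega
    · simp [h]

theorem eatenB_mono (ts : List Int) (r s : Int) (h : r ≤ s) :
    eatenB ts r ≤ eatenB ts s := by
  induction ts with
  | nil => simp [eatenB]
  | cons t ts ih =>
    rw [eatenB_cons, eatenB_cons]
    by_cases h0 : 0 < t
    · simp only [if_pos h0]; omega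
    · simp only [if_neg h0]; omega

theorem eatenB_total (ts : List Int) (R : Int) (h : ∀ t ∈ ts, t ≤ R) :
    eatenB ts R = (ts.filter (fun t => 0 < t)).sum := by
  induction ts with
  | nil => rfl
  | cons t ts ih =>
    have hts : ∀ t ∈ ts, t ≤ R := fun t ht => h t (by simp [ht])
    have hh := h t (by simp)
    rw [eatenB_cons, List.filter_cons, ih hts]
    by_cases h0 : 0 < t
    · simp [h0]
      omega
    · simp [h0]

theorem filter_sum_nonneg (ts : List Int) : 0 ≤ (ts.filter (fun t => 0 < t)).sum :=
  List.sum_nonneg (fun x hx => by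
    have := (List.mem_filter.1 hx).2
    have := of_decide_eq_true this
    omega)

theorem mem_le_total (ts : List Int) (h : ∀ t ∈ ts, 0 ≤ t) :
    ∀ t ∈ ts, t ≤ (ts.filter (fun t => 0 < t)).sum := by
  induction ts with
  | nil => intro t ht; simp at ht
  | cons t ts ih =>
    intro x hx
    have hts : ∀ t ∈ ts, 0 ≤ t := fun t ht => h t (by simp [ht])
    have hrest := filter_sum_nonneg ts
    rw [List.filter_cons]
    rcases List.mem_cons.1 hx with rfl | hx'
    · by_cases h0 : 0 < x
      · simp [h0]; omega
      · have := h x (by simp); simp [h0]; omega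
    · have := ih hts x hx'
      by_cases h0 : 0 < t
      · simp [h0]; omega
      · simp [h0]; omega

theorem eatenB_succ (ts : List Int) (r : Int) (hr : 0 ≤ r) :
    ∀ i : Int, eatenB ts (r + 1) = eatenB ts r + ((survIdx ts r i).length : Int) := by
  induction ts with
  | nil => intro i; simp [eatenB, survIdx]
  | cons t ts ih =>
    intro i
    rw [eatenB_cons, eatenB_cons]
    simp only [survIdx]
    have hih := ih (i + 1)
    by_cases hrt : r < t
    · rw [if_pos hrt]
      have h0t : 0 < t := by omega
      simp only [if_pos h0t, List.length_cons]
      push_cast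
      omega
    · rw [if_neg hrt]
      by_cases h0t : 0 < t
      · simp only [if_pos h0t]; omega
      · simp only [if_neg h0t]; omega

theorem rounds_len (ts : List Int) :
    ∀ (f : Nat) (p : Int), 0 ≤ p →
    ((rounds ts p f).length : Int) = eatenB ts (p + f) - eatenB ts p := by
  intro f
  induction f with
  | zero => intro p hp; simp [rounds]
  | succ f ih =>
    intro p hp
    rw [rounds]
    have h1 := ih (p + 1) (by omega)
    have h2 := eatenB_succ ts p hp 0
    rw [List.length_append]
    push_cast
    push_cast at h1
    rw [show p + ((f : Int) + 1) = (p + 1) + (f : Int) by ring]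
    omega

theorem get_rounds (ts : List Int) (k r : Int) (hr0 : 0 ≤ r)
    (hk1 : eatenB ts r ≤ k) (hk2 : k < eatenB ts (r + 1)) :
    ∀ (f : Nat) (p : Int), 0 ≤ p → p ≤ r → r < p + f →
    PySem.List.pyGet? (rounds ts p f) (k - eatenB ts p)
      = PySem.List.pyGet? (survIdx ts r 0) (k - eatenB ts r) := by
  intro f
  induction f with
  | zero => intro p hp hpr hrf; exfalso; push_cast at hrf; omega
  | succ f ih =>
    intro p hp hpr hrf
    rw [rounds]
    have hlen := eatenB_succ ts p hp 0
    by_cases hpr' : p = r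
    · subst hpr'
      have hj0 : 0 ≤ k - eatenB ts p := by omega
      have hjl : (k - eatenB ts p).toNat < (survIdx ts p 0).length := by omega
      rw [PySem.List.pyGet?_of_nonneg _ hj0, List.getElem?_append_left hjl,
        ← PySem.List.pyGet?_of_nonneg _ hj0]
    · have hplt : p + 1 ≤ r := by omega
      have hmono := eatenB_mono ts (p + 1) r hplt
      have hj0 : 0 ≤ k - eatenB ts p := by omega
      rw [PySem.List.pyGet?_of_nonneg _ hj0,
        List.getElem?_append_right (by omega : (survIdx ts p 0).length ≤ (k - eatenB ts p).toNat)]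
      have hrec := ih (p + 1) (by omega) hplt (by push_cast at hrf ⊢; omega)
      rw [PySem.List.pyGet?_of_nonneg _ (by omega : 0 ≤ k - eatenB ts (p + 1))] at hrec
      rw [show (k - eatenB ts p).toNat - (survIdx ts p 0).length
            = (k - eatenB ts (p + 1)).toNat by omega]
      exact hrec

theorem bsearchGo_inv (ts : List Int) (k : Int) :
    ∀ (fuel : Nat) (lo hi : Int), (hi - lo).toNat < fuel → 0 ≤ lo → lo ≤ hi →
    eatenB ts lo ≤ k → k < eatenB ts (hi + 1) →
    0 ≤ bsearchGo ts k fuel lo hi ∧ eatenB ts (bsearchGo ts k fuel lo hi) ≤ k ∧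
      k < eatenB ts (bsearchGo ts k fuel lo hi + 1) := by
  intro fuel
  induction fuel with
  | zero => intro lo hi hn; omega
  | succ fuel ih =>
    intro lo hi hn h0 hle hlo hhi
    rw [bsearchGo]
    by_cases h : lo < hi
    · rw [if_pos h]
      have hb1 := (PySem.Int.floordiv_two_mid_bounds (le_of_lt h)).1
      have hb2 : PySem.Int.floordiv (lo + hi) 2 < hi :=
        (PySem.Int.floordiv_lt_iff_lt_mul (by omega)).2 (by omega)
      by_cases hc : eatenB ts (PySem.Int.floordiv (lo + hi) 2 + 1) ≤ k
      · simp only [if_pos hc]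
        exact ih _ hi (by omega) (by omega) (by omega) hc hhi
      · simp only [if_neg hc]
        exact ih lo _ (by omega) h0 (by omega) hlo (by omega)
    · rw [if_neg h]
      have heq : lo = hi := by omega
      exact ⟨h0, hlo, heq ▸ hhi⟩

theorem bsearch_inv (ts : List Int) (k lo hi : Int) (h0 : 0 ≤ lo) (hle : lo ≤ hi)
    (hlo : eatenB ts lo ≤ k) (hhi : k < eatenB ts (hi + 1)) :
    0 ≤ bsearchB ts k lo hi ∧ eatenB ts (bsearchB ts k lo hi) ≤ k ∧
      k < eatenB ts (bsearchB ts k lo hi + 1) := by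
  unfold bsearchB
  exact bsearchGo_inv ts k ((hi - lo).toNat + 1) lo hi (by omega) h0 hle hlo hhi

theorem map_id0 (ts : List Int) (h : ∀ t ∈ ts, 0 ≤ t) :
    ts.map (fun t => t - min t 0) = ts := by
  induction ts with
  | nil => rfl
  | cons t ts ih =>
    have := h t (by simp)
    rw [List.map_cons, ih (fun t ht => h t (by simp [ht]))]
    congr 1
    omega

-- ===== VERDICT (by name: the statement is the Claim_ definition above) =====
theorem solution_spec : Claim_equal_solution := by
  intro ts k _ hpre
  obtain ⟨hnn, hk⟩ := hpre
  unfold Spec_solution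
  simp only [solution, solution_alt]
  have htotnn := filter_sum_nonneg ts
  have hFc : ((((ts.filter (fun t => 0 < t)).sum + 1).toNat : Nat) : Int)
      = (ts.filter (fun t => 0 < t)).sum + 1 := Int.toNat_of_nonneg (by omega)
  have hbound : ∀ t ∈ ts, t ≤ 0 + ((((ts.filter (fun t => 0 < t)).sum + 1).toNat : Nat) : Int) :=
    fun t ht => by have := mem_le_total ts hnn t ht; omega
  have horder : loopA ((ts.filter (fun t => 0 < t)).sum + 1).toNat [] ts
      = rounds ts 0 ((ts.filter (fun t => 0 < t)).sum + 1).toNat := by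
    have h := loopA_model ts hnn ((ts.filter (fun t => 0 < t)).sum + 1).toNat 0 [] le_rfl hbound
    rw [map_id0 ts hnn, List.nil_append] at h
    exact h
  have hEF : eatenB ts (0 + ((((ts.filter (fun t => 0 < t)).sum + 1).toNat : Nat) : Int))
      = (ts.filter (fun t => 0 < t)).sum :=
    eatenB_total ts _ (fun t ht => by have := mem_le_total ts hnn t ht; omega)
  have hlen : (((rounds ts 0 ((ts.filter (fun t => 0 < t)).sum + 1).toNat).length : Nat) : Int)
      = (ts.filter (fun t => 0 < t)).sum := by
    rw [rounds_len ts _ 0 le_rfl, eatenB_zero, hEF]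
    omega
  rw [horder]
  by_cases hcase : k ≥ (ts.filter (fun t => 0 < t)).sum
  · rw [if_pos (by omega : k > (((rounds ts 0 ((ts.filter (fun t => 0 < t)).sum + 1).toNat).length : Nat) : Int) - 1),
      if_pos hcase]
  · -- k < total : both sides take the eating branch
    have hklt : k < (ts.filter (fun t => 0 < t)).sum := by omega
    have hpos : ∃ t ∈ ts, 0 < t := by
      by_contra hno
      have hnil : ts.filter (fun t => 0 < t) = [] :=
        List.filter_eq_nil_iff.2 (fun a ha => by
          simp only [decide_eq_true_eq]
          exact fun h0 => hno ⟨a, ha, h0⟩)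
      rw [hnil] at hklt
      simp at hklt
      omega
    obtain ⟨t0, ht0m, ht0p⟩ := hpos
    obtain ⟨m, hm⟩ : ∃ m, PySem.List.max? ts (fun t => t) = some m := by
      cases hmm : PySem.List.max? ts (fun t => t) with
      | none =>
        have : ts = [] := (PySem.List.max?_eq_none_iff ts (fun t => t)).1 hmm
        subst this; simp at ht0m
      | some m => exact ⟨m, rfl⟩
    have hmax : ∀ t ∈ ts, t ≤ m := fun t ht => PySem.List.max?_isMax hm t ht
    have hm0 : 0 < m := lt_of_lt_of_le ht0p (hmax t0 ht0m)
    have hEm : eatenB ts (m + 1) = (ts.filter (fun t => 0 < t)).sum :=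
      eatenB_total ts (m + 1) (fun t ht => by have := hmax t ht; omega)
    obtain ⟨hr0, hrk, hrk1⟩ := bsearch_inv ts k 0 m le_rfl (by omega)
      (by rw [eatenB_zero]; exact hk) (by rw [hEm]; exact hklt)
    have hrF : bsearchB ts k 0 m < 0 + ((((ts.filter (fun t => 0 < t)).sum + 1).toNat : Nat) : Int) := by
      by_contra hge
      have h1 := eatenB_mono ts (0 + ((((ts.filter (fun t => 0 < t)).sum + 1).toNat : Nat) : Int))
        (bsearchB ts k 0 m) (by omega)
      omega
    have hget := get_rounds ts k (bsearchB ts k 0 m) hr0 hrk hrk1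
      ((ts.filter (fun t => 0 < t)).sum + 1).toNat 0 le_rfl hr0 (by omega)
    rw [eatenB_zero, sub_zero] at hget
    rw [if_neg (by omega : ¬ k > (((rounds ts 0 ((ts.filter (fun t => 0 < t)).sum + 1).toNat).length : Nat) : Int) - 1),
      if_neg (by omega : ¬ k ≥ (ts.filter (fun t => 0 < t)).sum)]
    simp only [hm, Option.getD_some]
    simp only [survIdx_b]
    rw [hget]
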